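-- pv_equiv track=rewrite | github.com/Homap/ZtoA_Heterozygosity | FastaModule.py | FaAsDict
-- ===== SOURCE A (Python) =====
-- def FaAsDict(fasta):
--         seqs = {}
--         for line in fasta:
--                 line = line.rstrip("\n")
--                 if line.startswith(">"):
--                         header = line.replace(">", "")
--                         seqs[header] = ""
--                 else:
--                         seqs[header] = seqs[header] + line
--         return seqs
-- ===== SOURCE B (Python) =====
-- def FaAsDict(fasta):
--         # Two-phase parse: segment the lines into (header, fragment-list) blocks,
--         # then collapse each block with a single join into the result dict.
--         blocks = []
--         for line in fasta:
--                 line = line.rstrip("\n")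
--                 if line.startswith(">"):
--                         blocks.append((line.replace(">", ""), []))
--                 else:
--                         blocks[-1][1].append(line)
--         result = {}
--         for header, frags in blocks:
--                 result[header] = "".join(frags)
--         return result
-- ===== Notes on version B (the rewrite author's own statement) =====
-- stated objective: alternative
-- what changed: Single-pass dict mutation with quadratic in-loop string concatenation is replaced by a two-phase parse: segment the lines into (header, fragment-list) blocks, then collapse each block with one join into the result dict; Pre_ excludes inputs whose first line is not a '>' header, where A raises NameError (and B raises IndexError).
import Mathlib
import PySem

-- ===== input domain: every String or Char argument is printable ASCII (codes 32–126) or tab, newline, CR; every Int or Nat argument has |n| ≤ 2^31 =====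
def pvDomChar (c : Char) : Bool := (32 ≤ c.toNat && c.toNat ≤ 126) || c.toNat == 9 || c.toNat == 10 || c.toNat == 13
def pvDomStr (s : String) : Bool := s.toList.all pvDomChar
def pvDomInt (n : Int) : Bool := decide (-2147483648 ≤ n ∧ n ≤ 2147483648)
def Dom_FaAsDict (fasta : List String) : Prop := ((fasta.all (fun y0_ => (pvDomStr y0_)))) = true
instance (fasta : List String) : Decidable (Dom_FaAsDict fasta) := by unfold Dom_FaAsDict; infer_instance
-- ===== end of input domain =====

-- B replaces A's per-line dict mutation with string concatenation by a two-phase parse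
-- (segment into (header, fragment-list) blocks, then one join per block): objective 'alternative'.
-- line.rstrip("\n") (PySem has no rstrip-with-chars): drop all trailing '\n'; exact.
def pvRstripNL (s : String) : String :=
  String.ofList (((s.toList.reverse).dropWhile (fun c => c == '\n')).reverse)

-- ===== PORT A =====
-- A's loop: state = (header seen so far, dict); 'header' before any '>' line is Python's
-- unbound name (NameError) — the 'none' branch is unreachable under Pre_FaAsDict.
def FaAsDict (fasta : List String) : List (String × String) :=
  (fasta.foldl
    (fun (st : Option String × PySem.Dict String String) line =>
      let line := pvRstripNL line
      if PySem.Str.startswith line ">" then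
        let header := PySem.Str.replace line ">" ""
        (some header, st.2.insert header "")
      else
        match st.1 with
        | some h => (some h, st.2.insert h (st.2.getD h "" ++ line))
        | none => st)
    (none, PySem.Dict.empty)).2.items

-- ===== PORT B =====
-- phase 1 helper: blocks[-1][1].append(line) (empty 'blocks' = Python IndexError, unreachable under Pre_)
def pvAppendLast (blocks : List (String × List String)) (line : String) :
    List (String × List String) :=
  match blocks with
  | [] => []
  | [(h, fs)] => [(h, fs ++ [line])]
  | b :: rest => b :: pvAppendLast rest line

def FaAsDict_alt (fasta : List String) : List (String × String) :=
  let blocks := fasta.foldl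
    (fun (blocks : List (String × List String)) line =>
      let line := pvRstripNL line
      if PySem.Str.startswith line ">" then
        blocks ++ [(PySem.Str.replace line ">" "", [])]
      else
        pvAppendLast blocks line)
    []
  (blocks.foldl
    (fun (result : PySem.Dict String String) b =>
      result.insert b.1 (PySem.Str.join "" b.2))
    PySem.Dict.empty).items

-- ===== PRECONDITION & SPEC =====
-- Pre_ excludes exactly the inputs where A raises NameError ('header' unbound): a first
-- line that is not a '>' header (B raises IndexError there too).
def Pre_FaAsDict (fasta : List String) : Prop :=
  fasta = [] ∨ PySem.Str.startswith (pvRstripNL (fasta.headD "")) ">" = true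
instance (fasta : List String) : Decidable (Pre_FaAsDict fasta) := by
  unfold Pre_FaAsDict; infer_instance

def pvWitness_FaAsDict : List String := [">seq1", "AC\n", "GT", ">seq2", "TT"]

def Spec_FaAsDict (fasta : List String) (out : List (String × String)) : Prop :=
  out = FaAsDict_alt fasta
instance (fasta : List String) (out : List (String × String)) : Decidable (Spec_FaAsDict fasta out) := by
  unfold Spec_FaAsDict; infer_instance

-- ===== CLAIM (what is proved, stated in full; the proofs are below) =====
def Claim_equal_FaAsDict : Prop :=
  ∀ (fasta : List String), Dom_FaAsDict fasta → Pre_FaAsDict fasta →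
    Spec_FaAsDict fasta (FaAsDict fasta)

-- ===== LEMMAS AND PROOFS =====

-- the join-collapse over one block
def pvDictOf (blocks : List (String × List String)) : PySem.Dict String String :=
  blocks.foldl (fun result b => result.insert b.1 (PySem.Str.join "" b.2)) PySem.Dict.empty

theorem pvDictOf_append (bs cs : List (String × List String)) :
    pvDictOf (bs ++ cs) =
      cs.foldl (fun result b => result.insert b.1 (PySem.Str.join "" b.2)) (pvDictOf bs) := by
  simp [pvDictOf, List.foldl_append]

theorem pvIntercalateNil (css : List (List Char)) :
    List.intercalate ([] : List Char) css = css.flatten := by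
  induction css with
  | nil => rfl
  | cons c rest ih =>
    cases rest with
    | nil => simp [List.intercalate]
    | cons d ds =>
      simp only [List.intercalate, List.intersperse_cons₂, List.flatten_cons] at ih ⊢
      simp [ih]

theorem pvJoin_append_singleton (fs : List String) (L : String) :
    PySem.Str.join "" (fs ++ [L]) = PySem.Str.join "" fs ++ L := by
  apply String.ext
  simp [PySem.Str.join, PySem.Chars.join, pvIntercalateNil]

theorem pvAppendLast_append (bs : List (String × List String)) (h : String)
    (fs : List String) (L : String) :
    pvAppendLast (bs ++ [(h, fs)]) L = bs ++ [(h, fs ++ [L])] := by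
  induction bs with
  | nil => simp [pvAppendLast]
  | cons b rest ih =>
    cases rest with
    | nil => simp [pvAppendLast]
    | cons c cs => simpa [pvAppendLast] using ih

theorem pvGetD_dictOf_last (bs : List (String × List String)) (h : String)
    (fs : List String) :
    (pvDictOf (bs ++ [(h, fs)])).getD h "" = PySem.Str.join "" fs := by
  rw [pvDictOf_append]
  simp [PySem.Dict.getD_insert_self]

-- main loop invariant: if the accumulated state of A is (some h, pvDictOf blocks) with
-- blocks = bs ++ [(h, fs)] (nonempty, h the current header), then A's final dict equals
-- the join-collapse of B's final blocks.
theorem pvLoop (lines : List String) (bs : List (String × List String))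
    (h : String) (fs : List String) :
    (lines.foldl
      (fun (st : Option String × PySem.Dict String String) line =>
        let line := pvRstripNL line
        if PySem.Str.startswith line ">" then
          let header := PySem.Str.replace line ">" ""
          (some header, st.2.insert header "")
        else
          match st.1 with
          | some h => (some h, st.2.insert h (st.2.getD h "" ++ line))
          | none => st)
      (some h, pvDictOf (bs ++ [(h, fs)]))).2 =
    pvDictOf (lines.foldl
      (fun (blocks : List (String × List String)) line =>
        let line := pvRstripNL line
        if PySem.Str.startswith line ">" then
          blocks ++ [(PySem.Str.replace line ">" "", [])]
        else
          pvAppendLast blocks line)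
      (bs ++ [(h, fs)])) := by
  induction lines generalizing bs h fs with
  | nil => rfl
  | cons line rest ih =>
    simp only [List.foldl_cons]
    rcases hb : PySem.Str.startswith (pvRstripNL line) ">" with _ | _
    case true =>
      have hd : pvDictOf ((bs ++ [(h, fs)]) ++ [(PySem.Str.replace (pvRstripNL line) ">" "", [])])
          = (pvDictOf (bs ++ [(h, fs)])).insert (PySem.Str.replace (pvRstripNL line) ">" "")
              (PySem.Str.join "" ([] : List String)) := by
        rw [pvDictOf_append]; rfl
      have hj : PySem.Str.join "" ([] : List String) = "" := rfl
      rw [hj] at hd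
      have := ih (bs ++ [(h, fs)]) (PySem.Str.replace (pvRstripNL line) ">" "") []
      rw [hd] at this
      simpa using this
    case false =>
      simp only [Bool.false_eq_true, if_false]
      have hA : (pvDictOf (bs ++ [(h, fs)])).insert h
            ((pvDictOf (bs ++ [(h, fs)])).getD h "" ++ pvRstripNL line)
          = pvDictOf (bs ++ [(h, fs ++ [pvRstripNL line])]) := by
        rw [pvGetD_dictOf_last, pvDictOf_append, pvDictOf_append]
        simp [PySem.Dict.insert_insert_self, pvJoin_append_singleton]
      have hB : pvAppendLast (bs ++ [(h, fs)]) (pvRstripNL line)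
          = bs ++ [(h, fs ++ [pvRstripNL line])] := pvAppendLast_append bs h fs _
      rw [hB]
      have := ih bs h (fs ++ [pvRstripNL line])
      rw [← this, ← hA]

-- ===== VERDICT (by name: the statement is the Claim_ definition above) =====
theorem FaAsDict_spec : Claim_equal_FaAsDict := by
  intro fasta _hdom hpre
  unfold Spec_FaAsDict FaAsDict FaAsDict_alt
  cases fasta with
  | nil => rfl
  | cons line rest =>
    rcases hpre with hpre | hpre
    · exact absurd hpre (by simp)
    · simp only [List.headD_cons] at hpre
      simp only [List.foldl_cons, hpre, if_pos]
      have := pvLoop rest [] (PySem.Str.replace (pvRstripNL line) ">" "") []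
      simp only [List.nil_append] at this
      have h0 : (PySem.Dict.empty : PySem.Dict String String).insert
            (PySem.Str.replace (pvRstripNL line) ">" "") ""
          = pvDictOf [(PySem.Str.replace (pvRstripNL line) ">" "", [])] := rfl
      rw [h0, this]
      simp [pvDictOf]
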